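-- pv_equiv track=rewrite | github.com/pypi-data/pypi-mirror-404 | packages/fast-agent-mcp/fast_agent_mcp-0.4.45.tar.gz/fast_agent_mcp-0.4.45/examples/reasoning_gauge_test.py | gauge_block2
-- ===== SOURCE A (Python) =====
-- FULL = "⣿"
--
-- INACTIVE = "ansibrightblack"
--
-- def get_color(lvl: int) -> str:
--     if lvl <= 1:
--         return "ansigreen"
--     elif lvl <= 2:
--         return "ansiyellow"
--     else:
--         return "ansired"
--
-- def gauge_block2(lvl: int, max_lvl: int = 4) -> str:
--     """Full blocks - inactive = bright_black braille."""
--     active_color = get_color(lvl)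
--
--     parts = []
--     for i in range(1, max_lvl + 1):
--         if i <= lvl:
--             parts.append(f"<style bg='{active_color}'>{FULL}</style>")
--         else:
--             parts.append(f"<style bg='{INACTIVE}'>{FULL}</style>")
--
--     return "".join(parts)
-- ===== SOURCE B (Python) =====
-- FULL = "\u28ff"
--
-- INACTIVE = "ansibrightblack"
--
-- def get_color(lvl: int) -> str:
--     if lvl <= 1:
--         return "ansigreen"
--     elif lvl <= 2:
--         return "ansiyellow"
--     else:
--         return "ansired"
--
-- def gauge_block2(lvl: int, max_lvl: int = 4) -> str:
--     """Full blocks - inactive = bright_black braille (count-then-repeat)."""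
--     active = f"<style bg='{get_color(lvl)}'>{FULL}</style>"
--     inactive = f"<style bg='{INACTIVE}'>{FULL}</style>"
--     n = max(0, min(lvl, max_lvl))
--     return active * n + inactive * (max_lvl - n)
-- ===== Notes on version B (the rewrite author's own statement) =====
-- stated objective: simpler
-- what changed: Replaces the per-block loop with an if/else branch by computing the clamped active count n = max(0, min(lvl, max_lvl)) up front and returning active_tag * n + inactive_tag * (max_lvl - n) via string repetition.
import Mathlib
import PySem

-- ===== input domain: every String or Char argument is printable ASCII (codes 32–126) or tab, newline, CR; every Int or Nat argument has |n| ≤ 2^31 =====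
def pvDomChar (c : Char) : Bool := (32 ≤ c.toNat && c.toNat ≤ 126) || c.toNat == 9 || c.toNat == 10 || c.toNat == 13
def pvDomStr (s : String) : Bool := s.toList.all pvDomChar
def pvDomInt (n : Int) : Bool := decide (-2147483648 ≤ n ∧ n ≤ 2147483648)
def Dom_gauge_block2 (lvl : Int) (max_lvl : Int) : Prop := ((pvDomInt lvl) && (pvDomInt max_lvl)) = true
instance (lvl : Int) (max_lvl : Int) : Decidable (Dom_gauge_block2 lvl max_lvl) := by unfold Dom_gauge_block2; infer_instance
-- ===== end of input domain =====

-- B replaces A's per-block loop-and-branch by a count-then-repeat decomposition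
-- (n clamped active tags followed by max_lvl - n inactive tags); objective: simpler.

-- ===== PORT A =====
-- helper get_color, shared module helper of both versions
def gauge_get_color (lvl : Int) : String :=
  if lvl ≤ 1 then "ansigreen"
  else if lvl ≤ 2 then "ansiyellow"
  else "ansired"

def gauge_block2 (lvl : Int) (max_lvl : Int) : String :=
  let active_color := gauge_get_color lvl
  let parts : List String :=
    (PySem.List.pyRange 1 (max_lvl + 1) 1).foldl
      (fun acc i =>
        if i ≤ lvl then
          acc ++ ["<style bg='" ++ active_color ++ "'>⣿</style>"]
        else
          acc ++ ["<style bg='" ++ "ansibrightblack" ++ "'>⣿</style>"]) []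
  PySem.Str.join "" parts

-- ===== PORT B =====
-- exact port of Python's `s * n` on strings (empty for n ≤ 0)
def pvStrMul (s : String) (n : Int) : String :=
  PySem.Str.join "" (PySem.List.pyRepeat [s] n)

def gauge_block2_alt (lvl : Int) (max_lvl : Int) : String :=
  let active := "<style bg='" ++ gauge_get_color lvl ++ "'>⣿</style>"
  let inactive := "<style bg='" ++ "ansibrightblack" ++ "'>⣿</style>"
  let n := max 0 (min lvl max_lvl)
  pvStrMul active n ++ pvStrMul inactive (max_lvl - n)

-- ===== PRECONDITION & SPEC =====
def Spec_gauge_block2 (lvl : Int) (max_lvl : Int) (out : String) : Prop := out = gauge_block2_alt lvl max_lvl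
instance (lvl : Int) (max_lvl : Int) (out : String) : Decidable (Spec_gauge_block2 lvl max_lvl out) := by unfold Spec_gauge_block2; infer_instance

-- ===== CLAIM (what is proved, stated in full; the proofs are below) =====
def Claim_equal_gauge_block2 : Prop := ∀ (lvl : Int) (max_lvl : Int), Dom_gauge_block2 lvl max_lvl → Spec_gauge_block2 lvl max_lvl (gauge_block2 lvl max_lvl)

-- ===== LEMMAS AND PROOFS =====

theorem joinNil_cons (x : List Char) (l : List (List Char)) :
    PySem.Chars.join [] (x :: l) = x ++ PySem.Chars.join [] l := by
  cases l with
  | nil => simp [PySem.Chars.join_singleton, PySem.Chars.join_nil]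
  | cons y rest => simp [PySem.Chars.join_cons_cons]

theorem joinNil_append (xs ys : List (List Char)) :
    PySem.Chars.join [] (xs ++ ys) = PySem.Chars.join [] xs ++ PySem.Chars.join [] ys := by
  induction xs with
  | nil => simp [PySem.Chars.join_nil]
  | cons x l ih => simp [joinNil_cons, ih]

theorem strJoin_empty_append (xs ys : List String) :
    PySem.Str.join "" (xs ++ ys) = PySem.Str.join "" xs ++ PySem.Str.join "" ys := by
  apply String.toList_inj.mp
  simp [String.toList_append, PySem.Str.toList_join, joinNil_append]

theorem range_map_ite {α : Type} (a b : α) (n : Nat) :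
    ∀ M : Nat, (List.range M).map (fun k => if k < n then a else b)
      = List.replicate (min n M) a ++ List.replicate (M - n) b := by
  intro M
  induction M with
  | zero => simp
  | succ M ih =>
    rw [List.range_succ, List.map_append, ih]
    by_cases h : M < n
    · have h1 : min n (M + 1) = M + 1 := by omega
      have h2 : min n M = M := by omega
      have h3 : M + 1 - n = 0 := by omega
      have h4 : M - n = 0 := by omega
      simp [h, h2, h3, h4, List.replicate_succ']
    · have h1 : min n (M + 1) = min n M := by omega
      have h2 : M + 1 - n = (M - n) + 1 := by omega
      simp [h, h1, h2, List.replicate_succ']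

-- ===== VERDICT (by name: the statement is the Claim_ definition above) =====
theorem gauge_block2_spec : Claim_equal_gauge_block2 := by
  intro lvl max_lvl _
  unfold Spec_gauge_block2 gauge_block2 gauge_block2_alt pvStrMul
  set ta := "<style bg='" ++ gauge_get_color lvl ++ "'>⣿</style>" with hta
  set tb := "<style bg='" ++ "ansibrightblack" ++ "'>⣿</style>" with htb
  simp only []
  have hfun : (fun (acc : List String) (i : Int) =>
      if i ≤ lvl then acc ++ [ta] else acc ++ [tb])
      = fun acc i => acc ++ [if i ≤ lvl then ta else tb] := by
    funext acc i; split <;> rfl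
  rw [hfun, PySem.List.foldl_append_singleton_eq_map, List.nil_append,
    PySem.List.pyRange_one, List.map_map]
  have hM : max_lvl + 1 - 1 = max_lvl := by ring
  rw [hM]
  set n : Nat := (max 0 (min lvl max_lvl)).toNat with hn
  set M : Nat := max_lvl.toNat with hMdef
  have hcong : (List.range M).map ((fun i => if i ≤ lvl then ta else tb) ∘ (fun k : Nat => 1 + (k : Int)))
      = (List.range M).map (fun k => if k < n then ta else tb) := by
    apply List.map_congr_left
    intro k hk
    rw [List.mem_range] at hk
    by_cases h : (1 : Int) + (k : Int) ≤ lvl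
    · have : k < n := by omega
      simp [Function.comp, h, this]
    · have : ¬ k < n := by omega
      simp [Function.comp, h, this]
  rw [hcong, range_map_ite]
  have h1 : min n M = n := by omega
  have h2 : M - n = (max_lvl - max 0 (min lvl max_lvl)).toNat := by omega
  rw [h1, h2, strJoin_empty_append, PySem.List.pyRepeat_singleton, PySem.List.pyRepeat_singleton]
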